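-- pv_equiv track=rewrite | github.com/cmf3673/CS_313E_Projects | OfficeSpace.py | uncontested_space
-- ===== SOURCE A (Python) =====
-- def tuple_splitter(tuple):
--     start = (tuple[0], tuple[1])
--     end = (tuple[2], tuple[3])
--     return start, end
--
-- def uncontested_space(building, person_space):
--     # CoUnTeR is ThE aREa.
--     counter = 0
--     start, end = tuple_splitter(person_space)
--     for i in range(start[1], end[1]):
--         for j in range(start[0], end[0]):
--             if building[i][j] == 1:
--                 counter += 1
--     return counter
-- ===== SOURCE B (Python) =====
-- def uncontested_space(building, person_space):
--     x0, y0, x1, y1 = person_space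
--     if x0 >= x1 or y0 >= y1:
--         return 0
--     pref = []
--     for row in building:
--         p = [0]
--         s = 0
--         for v in row:
--             if v == 1:
--                 s += 1
--             p.append(s)
--         pref.append(p)
--     total = 0
--     for i in range(y0, y1):
--         p = pref[i]
--         lo = max(x0, 0)
--         hi = min(x1, len(p) - 1)
--         if lo < hi:
--             total += p[hi] - p[lo]
--     return total
-- ===== Notes on version B (the rewrite author's own statement) =====
-- stated objective: alternative
-- what changed: Replaces the nested cell-by-cell conditional counting with a per-row prefix-sum table built once over the whole grid, answering the query per row by one subtraction of two prefix values with the column window clamped to the grid.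
-- intended difference: On windows whose column start is negative and whose wrapped (negative-index) cells contain a 1, A wraps around and also counts 1s at the right edge of each row, while B counts only the part of the rectangle inside the grid, the intended value for a rectangle query. — e.g. on uncontested_space([[1]], (-1, 0, 1, 1)): A returns 2, B returns 1
import Mathlib
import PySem

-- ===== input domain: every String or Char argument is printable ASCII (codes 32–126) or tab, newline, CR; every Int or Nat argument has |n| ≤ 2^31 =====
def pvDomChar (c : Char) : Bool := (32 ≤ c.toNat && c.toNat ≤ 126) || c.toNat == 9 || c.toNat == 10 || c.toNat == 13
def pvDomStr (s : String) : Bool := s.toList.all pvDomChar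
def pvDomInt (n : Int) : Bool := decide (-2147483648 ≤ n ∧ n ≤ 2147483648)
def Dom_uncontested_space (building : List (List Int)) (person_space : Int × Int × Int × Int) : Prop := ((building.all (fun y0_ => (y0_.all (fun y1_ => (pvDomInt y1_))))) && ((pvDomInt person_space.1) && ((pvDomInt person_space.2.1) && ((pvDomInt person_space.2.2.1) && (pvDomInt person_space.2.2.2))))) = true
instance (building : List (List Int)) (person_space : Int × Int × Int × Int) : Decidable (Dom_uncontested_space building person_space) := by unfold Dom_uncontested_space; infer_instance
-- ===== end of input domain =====

-- B replaces the nested cell-by-cell scan by a per-row prefix-sum table queried by subtraction,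
-- with the column window clamped to the grid (alternative algorithm; return value only, no mutation).

-- ===== PORT A =====
def tuple_splitter (t : Int × Int × Int × Int) : (Int × Int) × (Int × Int) :=
  ((t.1, t.2.1), (t.2.2.1, t.2.2.2))

def uncontested_space (building : List (List Int)) (person_space : Int × Int × Int × Int) : Int :=
  let (start, end_) := tuple_splitter person_space
  (PySem.List.pyRange start.2 end_.2).foldl (fun counter i =>
    (PySem.List.pyRange start.1 end_.1).foldl (fun counter j =>
      if PySem.List.pyGetD (PySem.List.pyGetD building i []) j 0 = 1 then counter + 1 else counter)
      counter) 0

-- ===== PORT B =====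
def uncontested_space_alt (building : List (List Int)) (person_space : Int × Int × Int × Int) : Int :=
  let x0 := person_space.1
  let y0 := person_space.2.1
  let x1 := person_space.2.2.1
  let y1 := person_space.2.2.2
  if x0 ≥ x1 ∨ y0 ≥ y1 then 0
  else
    let pref := building.foldl (fun pref row =>
      let ps := row.foldl (fun (ps : List Int × Int) v =>
        let s := if v = 1 then ps.2 + 1 else ps.2
        (ps.1 ++ [s], s)) ([0], 0)
      pref ++ [ps.1]) ([] : List (List Int))
    (PySem.List.pyRange y0 y1 1).foldl (fun total i =>
      let p := PySem.List.pyGetD pref i []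
      let lo := max x0 0
      let hi := min x1 ((p.length : Int) - 1)
      if lo < hi then total + (PySem.List.pyGetD p hi 0 - PySem.List.pyGetD p lo 0) else total) 0

-- ===== PRECONDITION & SPEC =====
-- Pre_ excludes exactly the inputs on which A raises IndexError (some row or column index of the
-- traversed window is outside Python's valid index range); it excludes no input on which A returns.
def Pre_uncontested_space (building : List (List Int)) (person_space : Int × Int × Int × Int) : Prop :=
  person_space.1 < person_space.2.2.1 → person_space.2.1 < person_space.2.2.2 →
    (-(building.length : Int) ≤ person_space.2.1 ∧
     person_space.2.2.2 ≤ (building.length : Int) ∧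
     ∀ i ∈ PySem.List.pyRange (max person_space.2.1 (-(building.length : Int)))
        (min person_space.2.2.2 (building.length : Int)) 1,
       -(((PySem.List.pyGetD building i []).length : Int)) ≤ person_space.1 ∧
       person_space.2.2.1 ≤ ((PySem.List.pyGetD building i []).length : Int))
instance (building : List (List Int)) (person_space : Int × Int × Int × Int) : Decidable (Pre_uncontested_space building person_space) := by unfold Pre_uncontested_space; infer_instance

def pvWitness_uncontested_space : List (List Int) × (Int × Int × Int × Int) := ([[1, 0], [0, 1]], (0, 0, 2, 2))

-- On windows whose column start is negative and whose wrapped (negative-index) cells contain a 1,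
-- A wraps around and also counts 1s at the right edge of each row, while B counts only the part of
-- the rectangle that lies inside the grid — the intended value for a rectangle query.
def D_uncontested_space (building : List (List Int)) (person_space : Int × Int × Int × Int) : Prop :=
  (decide (person_space.1 < 0) && decide (person_space.1 < person_space.2.2.1) &&
   decide (person_space.2.1 < person_space.2.2.2) &&
   (PySem.List.pyRange (max person_space.2.1 (-(building.length : Int)))
      (min person_space.2.2.2 (building.length : Int)) 1).any (fun i =>
     (PySem.List.pyRange
        (max person_space.1 (-(((PySem.List.pyGetD building i []).length : Int))))
        (min person_space.2.2.1 0) 1).any (fun j =>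
       decide (PySem.List.pyGetD (PySem.List.pyGetD building i []) j 0 = 1)))) = true
instance (building : List (List Int)) (person_space : Int × Int × Int × Int) : Decidable (D_uncontested_space building person_space) := by unfold D_uncontested_space; infer_instance

def Spec_uncontested_space (building : List (List Int)) (person_space : Int × Int × Int × Int) (out : Int) : Prop := ¬ D_uncontested_space building person_space → out = uncontested_space_alt building person_space
instance (building : List (List Int)) (person_space : Int × Int × Int × Int) (out : Int) : Decidable (Spec_uncontested_space building person_space out) := by unfold Spec_uncontested_space; infer_instance

def pvDiffWitness_uncontested_space : List (List Int) × (Int × Int × Int × Int) := ([[1]], (-1, 0, 1, 1))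
def pvDiffWitnessOut_uncontested_space : Int × Int := (2, 1)


-- ===== CLAIM (what is proved, stated in full; the proofs are below) =====
def Claim_unchanged_uncontested_space : Prop := ∀ (building : List (List Int)) (person_space : Int × Int × Int × Int), Dom_uncontested_space building person_space → Pre_uncontested_space building person_space → Spec_uncontested_space building person_space (uncontested_space building person_space)
def Claim_changed_uncontested_space : Prop := Dom_uncontested_space (pvDiffWitness_uncontested_space.1) (pvDiffWitness_uncontested_space.2) ∧ Pre_uncontested_space (pvDiffWitness_uncontested_space.1) (pvDiffWitness_uncontested_space.2) ∧ D_uncontested_space (pvDiffWitness_uncontested_space.1) (pvDiffWitness_uncontested_space.2) ∧ uncontested_space (pvDiffWitness_uncontested_space.1) (pvDiffWitness_uncontested_space.2) = pvDiffWitnessOut_uncontested_space.1 ∧ uncontested_space_alt (pvDiffWitness_uncontested_space.1) (pvDiffWitness_uncontested_space.2) = pvDiffWitnessOut_uncontested_space.2 ∧ pvDiffWitnessOut_uncontested_space.1 ≠ pvDiffWitnessOut_uncontested_space.2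
def Claim_exact_uncontested_space : Prop := ∀ (building : List (List Int)) (person_space : Int × Int × Int × Int), Dom_uncontested_space building person_space → Pre_uncontested_space building person_space → D_uncontested_space building person_space → uncontested_space building person_space ≠ uncontested_space_alt building person_space

-- ===== LEMMAS AND PROOFS =====

-- the list of per-row running 1-counts B's inner loop appends (proof-side model of the prefix table)
def prefAux : Int → List Int → List Int
  | _, [] => []
  | s, v :: r => (if v = 1 then s + 1 else s) :: prefAux (if v = 1 then s + 1 else s) r

def prefRow (row : List Int) : List Int := 0 :: prefAux 0 row

def cnt1 (l : List Int) : Int := (l.count 1 : Int)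

-- A's extra, wrapped (negative-index) part of the per-row count
def wRow (x0 x1 : Int) (row : List Int) : Int :=
  ((PySem.List.pyRange x0 (min x1 0) 1).countP
    (fun j => decide (PySem.List.pyGetD row j 0 = 1)) : Int)

-- B's clamped per-row contribution
def bRow (x0 x1 : Int) (row : List Int) : Int :=
  if max x0 0 < min x1 (row.length : Int) then
    cnt1 (row.take (min x1 (row.length : Int)).toNat) - cnt1 (row.take (max x0 0).toNat)
  else 0

lemma length_prefAux (s : Int) (row : List Int) : (prefAux s row).length = row.length := by
  induction row generalizing s with
  | nil => rfl
  | cons v r ih => simp [prefAux, ih]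

lemma getElem_prefAux (row : List Int) (s : Int) (k : Nat) (hk : k < row.length) :
    (prefAux s row)[k]'(by rw [length_prefAux]; exact hk) = s + cnt1 (row.take (k + 1)) := by
  induction row generalizing s k with
  | nil => simp at hk
  | cons v r ih =>
    cases k with
    | zero =>
      rcases eq_or_ne v 1 with h | h <;>
        simp [prefAux, cnt1, h]
    | succ k =>
      have hk' : k < r.length := by simpa using hk
      have := ih (if v = 1 then s + 1 else s) k hk'
      simp only [prefAux, List.getElem_cons_succ, this, cnt1, List.take_succ_cons,
        List.count_cons]
      rcases eq_or_ne v 1 with h | h <;> simp [h] <;> push_cast <;> ring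

lemma getD_prefRow (row : List Int) (m : Int) (h0 : 0 ≤ m) (h1 : m ≤ (row.length : Int)) :
    PySem.List.pyGetD (prefRow row) m 0 = cnt1 (row.take m.toNat) := by
  have hlen : (prefRow row).length = row.length + 1 := by simp [prefRow, length_prefAux]
  rw [PySem.List.pyGetD_eq_getElem _ _ h0 (by rw [hlen]; omega)]
  rcases Nat.eq_zero_or_pos m.toNat with hz | hp
  · simp [prefRow, hz, cnt1]
  · obtain ⟨k, hk⟩ : ∃ k, m.toNat = k + 1 := ⟨m.toNat - 1, by omega⟩
    have hklt : k < row.length := by omega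
    have := getElem_prefAux row 0 k hklt
    simp only [prefRow, hk, List.getElem_cons_succ, this]
    omega

lemma fold_pref (row : List Int) (p : List Int) (s : Int) :
    row.foldl (fun (ps : List Int × Int) v =>
      let s := if v = 1 then ps.2 + 1 else ps.2
      (ps.1 ++ [s], s)) (p, s)
    = (p ++ prefAux s row, (prefAux s row).getLastD s) := by
  induction row generalizing p s with
  | nil => simp [prefAux]
  | cons v r ih =>
    simp only [List.foldl_cons, ih, prefAux]
    refine Prod.ext ?_ ?_
    · simp [List.append_assoc]
    · rw [List.getLastD_cons]

lemma pyGetD_map_inRange {α β : Type} (f : α → β) (xs : List α) (i : Int) (d1 : β) (d2 : α)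
    (h : PySem.Raise.InRange xs.length i) :
    PySem.List.pyGetD (xs.map f) i d1 = f (PySem.List.pyGetD xs i d2) := by
  obtain ⟨hl, hr⟩ := h
  rcases le_or_gt 0 i with h0 | h0
  · rw [PySem.List.pyGetD_eq_getElem _ _ h0 (by simpa using hr),
      PySem.List.pyGetD_eq_getElem _ _ h0 hr, List.getElem_map]
  · have hk : i = -(((-i).toNat : Nat) : Int) := by omega
    rw [hk, PySem.List.pyGetD_neg_natCast _ _ _ (by omega) (by simp; omega),
      PySem.List.pyGetD_neg_natCast _ _ _ (by omega) (by omega), List.getElem_map]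
    simp

lemma mapSeg (row : List Int) (lo hi : Int) (h0 : 0 ≤ lo) (h1 : lo ≤ hi)
    (h2 : hi ≤ (row.length : Int)) :
    (PySem.List.pyRange lo hi 1).map (fun j => PySem.List.pyGetD row j 0)
      = (row.take hi.toNat).drop lo.toNat := by
  apply List.ext_getElem
  · simp [PySem.List.length_pyRange_one]
    omega
  · intro k hk1 hk2
    simp only [List.getElem_map, PySem.List.getElem_pyRange_one, List.getElem_drop,
      List.getElem_take]
    have hkr : (k : Int) < hi - lo := by
      simp [PySem.List.length_pyRange_one] at hk1
      omega
    rw [PySem.List.pyGetD_eq_getElem _ _ (by omega) (by omega)]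
    congr 1
    omega

lemma countSeg (row : List Int) (lo hi : Int) (h0 : 0 ≤ lo) (h1 : lo ≤ hi)
    (h2 : hi ≤ (row.length : Int)) :
    ((PySem.List.pyRange lo hi 1).countP
        (fun j => decide (PySem.List.pyGetD row j 0 = 1)) : Int)
      = cnt1 (row.take hi.toNat) - cnt1 (row.take lo.toNat) := by
  have hm := mapSeg row lo hi h0 h1 h2
  have hcount : ((row.take hi.toNat).drop lo.toNat).count 1
      = (PySem.List.pyRange lo hi 1).countP (fun j => decide (PySem.List.pyGetD row j 0 = 1)) := by
    rw [← hm, List.count, List.countP_map]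
    apply List.countP_congr
    intro j _
    simp [Function.comp, beq_iff_eq]
  have hsplit : row.take hi.toNat = row.take lo.toNat ++ (row.take hi.toNat).drop lo.toNat := by
    nth_rewrite 1 [← List.take_append_drop lo.toNat (row.take hi.toNat)]
    rw [List.take_take, min_eq_left (by omega : lo.toNat ≤ hi.toNat)]
  have : cnt1 (row.take hi.toNat) = cnt1 (row.take lo.toNat)
      + ((row.take hi.toNat).drop lo.toNat).count 1 := by
    simp only [cnt1]
    conv_lhs => rw [hsplit]
    rw [List.count_append]
    push_cast
    ring
  rw [this, hcount]
  ring

lemma row_decomp (row : List Int) (x0 x1 c : Int) (hx : x0 < x1)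
    (h1 : -(row.length : Int) ≤ x0) (h2 : x1 ≤ (row.length : Int)) :
    (PySem.List.pyRange x0 x1 1).foldl
      (fun cc j => if PySem.List.pyGetD row j 0 = 1 then cc + 1 else cc) c
    = c + (wRow x0 x1 row + bRow x0 x1 row) := by
  rcases le_or_gt 0 x0 with h0 | h0
  · have hw : wRow x0 x1 row = 0 := by
      rw [wRow, PySem.List.pyRange_one_eq_nil (by omega)]
      simp
    have hb : bRow x0 x1 row
        = cnt1 (row.take x1.toNat) - cnt1 (row.take x0.toNat) := by
      rw [bRow, if_pos (by omega), min_eq_left h2, max_eq_left h0]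
    rw [PySem.List.foldl_ite_add_one, hw, hb,
      ← countSeg row x0 x1 h0 (by omega) h2]
    ring
  · rw [PySem.List.pyRange_one_append x0 (min x1 0) x1 (by omega) (by omega),
      List.foldl_append, PySem.List.foldl_ite_add_one, PySem.List.foldl_ite_add_one]
    have hw : wRow x0 x1 row
        = ((PySem.List.pyRange x0 (min x1 0) 1).countP
            (fun j => decide (PySem.List.pyGetD row j 0 = 1)) : Int) := rfl
    rcases le_or_gt x1 0 with hx1 | hx1
    · have hm : min x1 0 = x1 := by omega
      have hb : bRow x0 x1 row = 0 := by
        rw [bRow, if_neg (by omega)]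
      rw [hm, PySem.List.pyRange_one_eq_nil (le_refl x1), hb, hw, hm]
      simp
    · have hm : min x1 0 = 0 := by omega
      have hb : bRow x0 x1 row = cnt1 (row.take x1.toNat) - cnt1 (row.take 0) := by
        rw [bRow, if_pos (by omega), min_eq_left h2, max_eq_right (by omega : x0 ≤ (0:Int))]
        simp
      rw [hm, hw, hm, countSeg row 0 x1 (le_refl 0) (by omega) h2, hb]
      simp only [Int.toNat_zero]
      ring

lemma foldl_id {α : Type} (l : List α) (c : Int) : l.foldl (fun c _ => c) c = c := by
  induction l generalizing c with
  | nil => rfl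
  | cons x r ih => simpa using ih c

lemma pref_build (building : List (List Int)) :
    List.foldl (fun (pref : List (List Int)) (row : List Int) =>
      let ps := row.foldl (fun (ps : List Int × Int) v =>
        let s := if v = 1 then ps.2 + 1 else ps.2
        (ps.1 ++ [s], s)) ([0], 0)
      pref ++ [ps.1]) [] building = building.map prefRow := by
  have hfun : (fun (pref : List (List Int)) (row : List Int) =>
      let ps := row.foldl (fun (ps : List Int × Int) v =>
        let s := if v = 1 then ps.2 + 1 else ps.2
        (ps.1 ++ [s], s)) ([0], 0)
      pref ++ [ps.1])
      = fun (pref : List (List Int)) (row : List Int) => pref ++ [prefRow row] := by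
    funext pref row
    show pref ++ [(row.foldl (fun (ps : List Int × Int) v =>
        let s := if v = 1 then ps.2 + 1 else ps.2
        (ps.1 ++ [s], s)) ([0], 0)).1] = pref ++ [prefRow row]
    rw [fold_pref]
    rfl
  rw [hfun, PySem.List.foldl_append_singleton_eq_map prefRow building []]
  rfl

-- both totals in closed form: A = Σ (wRow + bRow), B = Σ bRow over the visited rows
lemma totals (building : List (List Int)) (x0 y0 x1 y1 : Int) (hx : x0 < x1)
    (hpre : ∀ i ∈ PySem.List.pyRange y0 y1 1,
      PySem.Raise.InRange building.length i ∧
      ∀ j ∈ PySem.List.pyRange x0 x1 1,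
        PySem.Raise.InRange (PySem.List.pyGetD building i []).length j) :
    uncontested_space building (x0, y0, x1, y1)
      = ((PySem.List.pyRange y0 y1 1).map
          (fun i => wRow x0 x1 (PySem.List.pyGetD building i []))).sum
        + ((PySem.List.pyRange y0 y1 1).map
          (fun i => bRow x0 x1 (PySem.List.pyGetD building i []))).sum ∧
    uncontested_space_alt building (x0, y0, x1, y1)
      = (if x0 ≥ x1 ∨ y0 ≥ y1 then 0 else
          ((PySem.List.pyRange y0 y1 1).map
            (fun i => bRow x0 x1 (PySem.List.pyGetD building i []))).sum) := by
  constructor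
  · unfold uncontested_space tuple_splitter
    simp only []
    rw [PySem.List.foldl_congr_mem' _ _
      (fun c i => c + (wRow x0 x1 (PySem.List.pyGetD building i [])
        + bRow x0 x1 (PySem.List.pyGetD building i []))) _ ?_]
    · rw [PySem.List.foldl_add]
      rw [PySem.List.sum_map_add_int]
      ring
    · intro i hi c
      obtain ⟨_, hj⟩ := hpre i hi
      have hlo := (hj x0 (by rw [PySem.List.mem_pyRange_one]; omega)).1
      have hhi := (hj (x1 - 1) (by rw [PySem.List.mem_pyRange_one]; omega)).2
      exact row_decomp _ x0 x1 c hx hlo (by omega)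
  · unfold uncontested_space_alt
    simp only []
    split_ifs with hif
    · rfl
    · push_neg at hif
      rw [pref_build]
      rw [PySem.List.foldl_congr_mem' _ _
        (fun total i => total + bRow x0 x1 (PySem.List.pyGetD building i [])) _ ?_]
      · rw [PySem.List.foldl_add]
        simp
      · intro i hi total
        have hir := (hpre i hi).1
        simp only []
        rw [pyGetD_map_inRange prefRow building i _ [] hir]
        set row := PySem.List.pyGetD building i [] with hrow
        have hlen : ((prefRow row).length : Int) - 1 = (row.length : Int) := by
          simp [prefRow, length_prefAux]
        rw [hlen]
        split_ifs with hcond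
        · have h0lo : (0 : Int) ≤ max x0 0 := by omega
          have hhile : min x1 (row.length : Int) ≤ (row.length : Int) := by omega
          rw [getD_prefRow row _ (by omega) hhile,
            getD_prefRow row _ h0lo (by omega)]
          rw [bRow, if_pos hcond]
        · rw [bRow, if_neg hcond]
          ring

-- the change region read back as a proposition
lemma D_iff (building : List (List Int)) (x0 y0 x1 y1 : Int) :
    D_uncontested_space building (x0, y0, x1, y1) ↔
    (x0 < 0 ∧ x0 < x1 ∧ y0 < y1 ∧
     ∃ i ∈ PySem.List.pyRange (max y0 (-(building.length : Int)))
        (min y1 (building.length : Int)) 1,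
       ∃ j ∈ PySem.List.pyRange
          (max x0 (-(((PySem.List.pyGetD building i []).length : Int)))) (min x1 0) 1,
         PySem.List.pyGetD (PySem.List.pyGetD building i []) j 0 = 1) := by
  unfold D_uncontested_space
  simp [List.any_eq_true, and_assoc]

-- bridge: the clamped bounds of Pre_ give Python-valid indices for every visited cell
lemma pre_bridge (building : List (List Int)) (x0 y0 x1 y1 : Int)
    (hylo : -(building.length : Int) ≤ y0) (hyhi : y1 ≤ (building.length : Int))
    (hcols : ∀ i ∈ PySem.List.pyRange (max y0 (-(building.length : Int)))
        (min y1 (building.length : Int)) 1,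
      -(((PySem.List.pyGetD building i []).length : Int)) ≤ x0 ∧
      x1 ≤ ((PySem.List.pyGetD building i []).length : Int)) :
    ∀ i ∈ PySem.List.pyRange y0 y1 1,
      PySem.Raise.InRange building.length i ∧
      ∀ j ∈ PySem.List.pyRange x0 x1 1,
        PySem.Raise.InRange (PySem.List.pyGetD building i []).length j := by
  intro i hi
  have hc := hcols i (by rw [PySem.List.mem_pyRange_one] at hi ⊢; omega)
  rw [PySem.List.mem_pyRange_one] at hi
  refine ⟨⟨by omega, by omega⟩, ?_⟩
  intro j hj
  rw [PySem.List.mem_pyRange_one] at hj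
  exact ⟨by omega, by omega⟩

-- W = 0 outside D_ (for nonempty windows satisfying Pre_'s bounds)
lemma w_vanishes (building : List (List Int)) (x0 y0 x1 y1 : Int) (hx : x0 < x1) (hy : y0 < y1)
    (hylo : -(building.length : Int) ≤ y0) (hyhi : y1 ≤ (building.length : Int))
    (hcol : ∀ i ∈ PySem.List.pyRange y0 y1 1,
      -(((PySem.List.pyGetD building i []).length : Int)) ≤ x0)
    (hnd : ¬ D_uncontested_space building (x0, y0, x1, y1)) :
    ∀ i ∈ PySem.List.pyRange y0 y1 1, wRow x0 x1 (PySem.List.pyGetD building i []) = 0 := by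
  intro i hi
  rcases le_or_gt 0 x0 with h0 | h0
  · rw [wRow, PySem.List.pyRange_one_eq_nil (by omega)]
    simp
  · rw [wRow]
    have hz : (PySem.List.pyRange x0 (min x1 0) 1).countP
        (fun j => decide (PySem.List.pyGetD (PySem.List.pyGetD building i []) j 0 = 1)) = 0 := by
      rw [List.countP_eq_zero]
      intro j hj
      simp only [decide_eq_true_eq]
      intro h1
      apply hnd
      rw [D_iff]
      refine ⟨h0, hx, hy, i, ?_, j, ?_, h1⟩
      · show i ∈ PySem.List.pyRange (max y0 (-(building.length : Int)))
            (min y1 (building.length : Int)) 1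
        rw [PySem.List.mem_pyRange_one] at hi ⊢
        omega
      · show j ∈ PySem.List.pyRange
            (max x0 (-(((PySem.List.pyGetD building i []).length : Int)))) (min x1 0) 1
        have := hcol i hi
        rw [PySem.List.mem_pyRange_one] at hj ⊢
        omega
    rw [hz]
    rfl

-- ===== VERDICT (by name: the statement is the Claim_ definition above) =====
theorem uncontested_space_spec : Claim_unchanged_uncontested_space := by
  intro building ps hdom hpre hnd
  obtain ⟨x0, y0, x1, y1⟩ := ps
  by_cases hx : x0 < x1
  · by_cases hy : y0 < y1
    · obtain ⟨hylo', hyhi', hcols'⟩ := hpre hx hy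
      have hylo : -(building.length : Int) ≤ y0 := hylo'
      have hyhi : y1 ≤ (building.length : Int) := hyhi'
      have hcols : ∀ i ∈ PySem.List.pyRange (max y0 (-(building.length : Int)))
          (min y1 (building.length : Int)) 1,
          -(((PySem.List.pyGetD building i []).length : Int)) ≤ x0 ∧
          x1 ≤ ((PySem.List.pyGetD building i []).length : Int) := hcols'
      obtain ⟨hA, hB⟩ := totals building x0 y0 x1 y1 hx
        (pre_bridge building x0 y0 x1 y1 hylo hyhi hcols)
      rw [hA, hB, if_neg (by omega)]
      have hw : ((PySem.List.pyRange y0 y1 1).map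
          (fun i => wRow x0 x1 (PySem.List.pyGetD building i []))).sum = 0 := by
        apply List.sum_eq_zero
        intro x hxm
        obtain ⟨i, hi, hix⟩ := List.mem_map.mp hxm
        rw [← hix]
        exact w_vanishes building x0 y0 x1 y1 hx hy hylo hyhi
          (fun i hi => (hcols i (by rw [PySem.List.mem_pyRange_one] at hi ⊢; omega)).1)
          hnd i hi
      rw [hw]
      ring
    · unfold uncontested_space uncontested_space_alt tuple_splitter
      simp only []
      rw [if_pos (by omega),
        PySem.List.pyRange_one_eq_nil (show y1 ≤ y0 by omega)]
      rfl
  · unfold uncontested_space uncontested_space_alt tuple_splitter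
    simp only []
    rw [if_pos (by omega)]
    have : ∀ i ∈ PySem.List.pyRange y0 y1 1, ∀ c : Int,
        (PySem.List.pyRange x0 x1 1).foldl (fun counter j =>
          if PySem.List.pyGetD (PySem.List.pyGetD building i []) j 0 = 1 then counter + 1
          else counter) c = (fun (c : Int) (_ : Int) => c) c i := by
      intro i _ c
      rw [PySem.List.pyRange_one_eq_nil (by omega)]
      rfl
    rw [PySem.List.foldl_congr_mem' _ _ _ _ this, foldl_id]

theorem uncontested_space_changed : Claim_changed_uncontested_space := by
  unfold Claim_changed_uncontested_space; decide

theorem uncontested_space_tight : Claim_exact_uncontested_space := by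
  intro building ps hdom hpre hd
  obtain ⟨x0, y0, x1, y1⟩ := ps
  rw [D_iff] at hd
  obtain ⟨h0x, hxx, hyx, i0, hi0x, j0, hj0x, honex⟩ := hd
  have h0 : x0 < 0 := h0x
  have hx : x0 < x1 := hxx
  have hy : y0 < y1 := hyx
  have hi0 : i0 ∈ PySem.List.pyRange (max y0 (-(building.length : Int)))
      (min y1 (building.length : Int)) 1 := hi0x
  have hj0 : j0 ∈ PySem.List.pyRange
      (max x0 (-(((PySem.List.pyGetD building i0 []).length : Int)))) (min x1 0) 1 := hj0x
  have hone : PySem.List.pyGetD (PySem.List.pyGetD building i0 []) j0 0 = 1 := honex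
  have hi0' : i0 ∈ PySem.List.pyRange y0 y1 1 := by
    rw [PySem.List.mem_pyRange_one] at hi0 ⊢
    omega
  have hj0' : j0 ∈ PySem.List.pyRange x0 (min x1 0) 1 := by
    rw [PySem.List.mem_pyRange_one] at hj0 ⊢
    omega
  obtain ⟨hylo', hyhi', hcols'⟩ := hpre hx hy
  have hylo : -(building.length : Int) ≤ y0 := hylo'
  have hyhi : y1 ≤ (building.length : Int) := hyhi'
  have hcols : ∀ i ∈ PySem.List.pyRange (max y0 (-(building.length : Int)))
      (min y1 (building.length : Int)) 1,
      -(((PySem.List.pyGetD building i []).length : Int)) ≤ x0 ∧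
      x1 ≤ ((PySem.List.pyGetD building i []).length : Int) := hcols'
  obtain ⟨hA, hB⟩ := totals building x0 y0 x1 y1 hx
    (pre_bridge building x0 y0 x1 y1 hylo hyhi hcols)
  rw [hA, hB, if_neg (by push_neg; exact ⟨hx, hy⟩)]
  have hwpos : 1 ≤ ((PySem.List.pyRange y0 y1 1).map
      (fun i => wRow x0 x1 (PySem.List.pyGetD building i []))).sum := by
    have hmem : wRow x0 x1 (PySem.List.pyGetD building i0 [])
        ∈ (PySem.List.pyRange y0 y1 1).map
          (fun i => wRow x0 x1 (PySem.List.pyGetD building i [])) :=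
      List.mem_map.mpr ⟨i0, hi0', rfl⟩
    have hnonneg : ∀ x ∈ (PySem.List.pyRange y0 y1 1).map
        (fun i => wRow x0 x1 (PySem.List.pyGetD building i [])), (0 : Int) ≤ x := by
      intro x hxm
      obtain ⟨i, _, hix⟩ := List.mem_map.mp hxm
      rw [← hix, wRow]
      positivity
    have hle := List.single_le_sum hnonneg _ hmem
    have h1w : 1 ≤ wRow x0 x1 (PySem.List.pyGetD building i0 []) := by
      rw [wRow]
      have : 0 < (PySem.List.pyRange x0 (min x1 0) 1).countP
          (fun j => decide (PySem.List.pyGetD (PySem.List.pyGetD building i0 []) j 0 = 1)) := by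
        rw [List.countP_pos_iff]
        exact ⟨j0, hj0', by simpa using hone⟩
      omega
    omega
  omega
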